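-- pv_equiv track=rewrite | github.com/liupengsay/PyIsTheBestLang | algorithm/src/mathmatics/bit_operation.py | lc_2564
-- ===== SOURCE A (Python) =====
-- from collections import defaultdict
--
-- def lc_2564(s, queries):
--     # 预处理相同异或值的索引
--     dct = defaultdict(set)
--     m = len(queries)
--     for i in range(m):
--         a, b = queries[i]
--         x = bin(a ^ b)[2:]
--         dct[x].add(i)
--     ceil = max(len(x) for x in dct)
--     ans = [[-1, -1] for _ in range(m)]
--     # 遍历往前回溯查找个数
--     n = len(s)
--     for i in range(n):
--         for j in range(max(i - ceil + 1, 0), i+1):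
--             st = s[j:i + 1]
--             if dct[st]:
--                 for k in dct[st]:
--                     ans[k] = [j, i]
--                 dct[st] = set()
--     return ans
-- ===== SOURCE B (Python) =====
-- def lc_2564(s, queries):
--     # Group query indices by their binary value string, then one str.find per distinct value.
--     groups = {}
--     for i, (a, b) in enumerate(queries):
--         groups.setdefault(bin(a ^ b)[2:], []).append(i)
--     ans = [[-1, -1] for _ in range(len(queries))]
--     for x, idxs in groups.items():
--         p = s.find(x)
--         if p != -1:
--             for k in idxs:
--                 ans[k] = [p, p + len(x) - 1]
--     return ans
-- ===== Notes on version B (the rewrite author's own statement) =====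
-- stated objective: simpler
-- what changed: Replaces A's scan over all substring end positions with a back-window and a mutable dict-of-sets by grouping query indices per distinct binary value string and doing one s.find(x) per distinct value (fixed-length values make the first occurrence the answer).
import Mathlib
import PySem

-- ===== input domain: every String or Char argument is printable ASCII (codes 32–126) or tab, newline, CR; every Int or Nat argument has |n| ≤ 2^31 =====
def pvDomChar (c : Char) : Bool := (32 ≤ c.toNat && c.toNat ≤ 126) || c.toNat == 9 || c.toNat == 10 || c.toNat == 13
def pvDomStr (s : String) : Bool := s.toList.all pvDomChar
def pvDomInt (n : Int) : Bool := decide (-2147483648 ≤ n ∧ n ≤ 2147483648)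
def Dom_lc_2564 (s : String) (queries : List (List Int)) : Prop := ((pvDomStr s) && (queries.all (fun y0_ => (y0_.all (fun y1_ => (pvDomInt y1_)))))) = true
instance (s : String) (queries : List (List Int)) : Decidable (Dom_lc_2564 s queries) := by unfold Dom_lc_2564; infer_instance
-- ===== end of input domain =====

-- B groups query indices per distinct binary value string and does one find per value,
-- replacing A's scan over all substring end positions with a mutable dict of index sets.

-- ===== PORT A =====

/-- `bin(a ^ b)[2:]` for a query `[a, b]` (missing entries read as 0; Pre_ guarantees arity 2;
`[2:]` on the string is `List.drop 2` on its code points — exact). -/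
def lc2564Bin (q : List Int) : List Char :=
  (PySem.Int.toBinChars0b
    (PySem.Int.bxor (PySem.List.pyGetD q 0 0) (PySem.List.pyGetD q 1 0))).drop 2

-- Port of A.  defaultdict reads are modelled by `getD` (value-faithful: a read of a missing
-- key yields the empty set, and `ceil` is computed before any such read could add a key).
-- The `for k in dct[st]` loop writes distinct indices, so Python's set iteration order
-- cannot affect the result; the set is folded in its PySem.Set order.
def lc_2564 (s : String) (queries : List (List Int)) : List (List Int) :=
  let m : Int := PySem.List.len queries
  let dct : PySem.Dict (List Char) (PySem.Set Int) :=
    (PySem.List.pyRange 0 m 1).foldl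
      (fun d i =>
        let x := lc2564Bin (PySem.List.pyGetD queries i [])
        d.modify x PySem.Set.empty (fun st => PySem.Set.add st i)) PySem.Dict.empty
  let ceil : Int :=
    (PySem.List.max? (dct.keys.map (fun x => PySem.List.len x)) id).getD 0
  let ans0 : List (List Int) := (PySem.List.pyRange 0 m 1).map (fun _ => ([-1, -1] : List Int))
  let n : Int := PySem.Str.len s
  let res :=
    (PySem.List.pyRange 0 n 1).foldl
      (fun (st : PySem.Dict (List Char) (PySem.Set Int) × List (List Int)) i =>
        (PySem.List.pyRange (max (i - ceil + 1) 0) (i + 1) 1).foldl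
          (fun st2 j =>
            let sub := PySem.List.slice s.toList (some j) (some (i + 1))
            let grp := st2.1.getD sub PySem.Set.empty
            if grp ≠ [] then
              (st2.1.insert sub PySem.Set.empty,
               grp.foldl (fun a k => PySem.List.pySetD a k [j, i]) st2.2)
            else st2)
          st)
      (dct, ans0)
  res.2

-- ===== PORT B =====

-- Port of B (Source B): group query indices per distinct value string, one find per value.
def lc_2564_alt (s : String) (queries : List (List Int)) : List (List Int) :=
  let groups : PySem.Dict (List Char) (List Int) :=
    (PySem.List.enumerate queries).foldl
      (fun d p => d.modify (lc2564Bin p.2) [] (fun l => l ++ [p.1])) PySem.Dict.empty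
  let ans0 : List (List Int) :=
    (PySem.List.pyRange 0 (PySem.List.len queries) 1).map (fun _ => ([-1, -1] : List Int))
  groups.items.foldl
    (fun ans xi =>
      let p := PySem.Chars.find s.toList xi.1
      if p ≠ -1 then
        xi.2.foldl (fun a k => PySem.List.pySetD a k [p, p + PySem.List.len xi.1 - 1]) ans
      else ans)
    ans0

-- ===== PRECONDITION & SPEC =====

-- Pre_ excludes exactly the inputs where Python A raises: empty `queries` (ValueError from
-- `max()` on an empty generator) and queries without exactly two entries (unpacking error).
def Pre_lc_2564 (s : String) (queries : List (List Int)) : Prop :=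
  queries ≠ [] ∧ ∀ q ∈ queries, q.length = 2
instance (s : String) (queries : List (List Int)) : Decidable (Pre_lc_2564 s queries) := by
  unfold Pre_lc_2564; infer_instance

def pvWitness_lc_2564 : String × List (List Int) := ("b1101", [[1, 2], [5, 5], [-3, 2]])

def Spec_lc_2564 (s : String) (queries : List (List Int)) (out : List (List Int)) : Prop :=
  out = lc_2564_alt s queries
instance (s : String) (queries : List (List Int)) (out : List (List Int)) :
    Decidable (Spec_lc_2564 s queries out) := by unfold Spec_lc_2564; infer_instance

-- ===== CLAIM (what is proved, stated in full; the proofs are below) =====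
def Claim_equal_lc_2564 : Prop := ∀ (s : String) (queries : List (List Int)),
  Dom_lc_2564 s queries → Pre_lc_2564 s queries → Spec_lc_2564 s queries (lc_2564 s queries)

-- ===== LEMMAS AND PROOFS =====

/-- The binary value string of query index `k`. -/
def lc2564X (queries : List (List Int)) (k : Nat) : List Char := lc2564Bin (queries.getD k [])

/-- The per-value answer both programs compute. -/
def lc2564G (cs : List Char) (x : List Char) : List Int :=
  if PySem.Chars.find cs x = -1 then [-1, -1]
  else [PySem.Chars.find cs x, PySem.Chars.find cs x + (x.length : Int) - 1]

/-- Common target: the answer, query by query. -/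
def lc2564Tgt (s : String) (queries : List (List Int)) : List (List Int) :=
  queries.map (fun q => lc2564G s.toList (lc2564Bin q))

/-- The group of a value string: the indices of the queries having that value. -/
def lc2564Grp (queries : List (List Int)) (x : List Char) : List Int :=
  ((List.range queries.length).filter (fun k => lc2564X queries k == x)).map (fun (k : Nat) => (k : Int))

/-- The substring a window `(j, i)` denotes. -/
def lc2564Sub (cs : List Char) (w : Int × Int) : List Char :=
  PySem.List.slice cs (some w.1) (some (w.2 + 1))

/-- The scan step of A's main loop, on a flattened window. -/
def lc2564Step (cs : List Char)
    (st2 : PySem.Dict (List Char) (PySem.Set Int) × List (List Int)) (w : Int × Int) :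
    PySem.Dict (List Char) (PySem.Set Int) × List (List Int) :=
  let sub := lc2564Sub cs w
  let grp := st2.1.getD sub PySem.Set.empty
  if grp ≠ [] then
    (st2.1.insert sub PySem.Set.empty,
     grp.foldl (fun a k => PySem.List.pySetD a k [w.1, w.2]) st2.2)
  else st2

/-- A's window list, in scan order. -/
def lc2564W (cs : List Char) (ceil : Int) : List (Int × Int) :=
  (PySem.List.pyRange 0 (cs.length : Int) 1).flatMap
    (fun i => (PySem.List.pyRange (max (i - ceil + 1) 0) (i + 1) 1).map (fun j => (j, i)))

theorem lc2564_tdc_ne (b : Nat) : ∀ (fuel n : Nat) (acc : List Char),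
    acc ≠ [] → Nat.toDigitsCore b fuel n acc ≠ []
  | 0, _, _, h => by simpa [Nat.toDigitsCore] using h
  | fuel+1, _, _, h => by
    simp only [Nat.toDigitsCore]
    split
    · simp
    · exact lc2564_tdc_ne b fuel _ _ (by simp)

theorem lc2564_toDigits_ne_nil (b n : Nat) : Nat.toDigits b n ≠ [] := by
  unfold Nat.toDigits Nat.toDigitsCore
  dsimp only
  split_ifs
  · simp
  · exact lc2564_tdc_ne b n (n / b) _ (by simp)

theorem lc2564Bin_ne_nil (q : List Int) : lc2564Bin q ≠ [] := by
  unfold lc2564Bin PySem.Int.toBinChars0b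
  split_ifs
  · simp
  · simpa using lc2564_toDigits_ne_nil 2 _

theorem lc2564_mem_grp (queries : List (List Int)) (x : List Char) (i : Int) :
    i ∈ lc2564Grp queries x ↔ ∃ k : Nat, i = (k : Int) ∧ k < queries.length ∧ lc2564X queries k = x := by
  unfold lc2564Grp
  rw [List.mem_map]
  constructor
  · rintro ⟨k, hk, rfl⟩
    rw [List.mem_filter, List.mem_range] at hk
    exact ⟨k, rfl, hk.1, by simpa using hk.2⟩
  · rintro ⟨k, rfl, hk, hx⟩
    exact ⟨k, by rw [List.mem_filter, List.mem_range]; exact ⟨hk, by simpa using hx⟩, rfl⟩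

theorem lc2564_self_mem_grp (queries : List (List Int)) (j : Nat) (hj : j < queries.length) :
    (j : Int) ∈ lc2564Grp queries (lc2564X queries j) := by
  exact (lc2564_mem_grp _ _ _).2 ⟨j, rfl, hj, rfl⟩

theorem lc2564_setFold (I : List Int) (hI : ∀ i ∈ I, 0 ≤ i) (v : List Int) :
    ∀ (a : List (List Int)) (j : Nat),
      (I.foldl (fun a k => PySem.List.pySetD a k v) a)[j]? =
        if (j : Int) ∈ I then a[j]?.map (fun _ => v) else a[j]? := by
  induction I with
  | nil => simp
  | cons i I ih =>
    intro a j
    have hi : 0 ≤ i := hI i (by simp)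
    have hI' : ∀ i' ∈ I, 0 ≤ i' := fun i' h => hI i' (by simp [h])
    simp only [List.foldl_cons, ih hI', PySem.List.pySetD_of_nonneg _ _ hi]
    by_cases hji : (j : Int) = i
    · have hij : i.toNat = j := by omega
      have hself : (a.set i.toNat v)[j]? = a[j]?.map (fun _ => v) := by
        rw [hij]; simpa using List.getElem?_set_self' (l := a) (i := j) (a := v)
      by_cases hJI : (j : Int) ∈ I
      · rw [if_pos hJI, if_pos (by simp [hJI]), hself]
        cases a[j]? <;> rfl
      · rw [if_neg hJI, if_pos (by simp [hji]), hself]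
    · have hij : i.toNat ≠ j := by omega
      rw [List.getElem?_set_ne hij]
      by_cases hJI : (j : Int) ∈ I
      · rw [if_pos hJI, if_pos (by simp [hJI])]
      · rw [if_neg hJI, if_neg (by simp [hji, hJI])]

theorem lc2564_setFold_length (I : List Int) (v : List Int) :
    ∀ (a : List (List Int)), (I.foldl (fun a k => PySem.List.pySetD a k v) a).length = a.length := by
  induction I with
  | nil => simp
  | cons i I ih =>
    intro a
    simp only [List.foldl_cons, ih, PySem.List.length_pySetD]

theorem lc2564_enum_map (f : List Int → List Char) (xs : List (List Int)) : ∀ (st : Int),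
    (PySem.List.enumerate xs st).map (fun p => f p.2) = xs.map f := by
  induction xs with
  | nil => intro st; simp [PySem.List.enumerate]
  | cons q t ih => intro st; simp [PySem.List.enumerate, ih]

theorem lc2564_enum_filter (x : List Char) (xs : List (List Int)) : ∀ (st : Int),
    ((PySem.List.enumerate xs st).filter (fun p => lc2564Bin p.2 == x)).map (fun p => p.1)
      = ((List.range xs.length).filter (fun k => lc2564Bin (xs.getD k []) == x)).map
          (fun (k : Nat) => st + (k : Int)) := by
  induction xs with
  | nil => intro st; simp [PySem.List.enumerate]
  | cons q t ih =>
    intro st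
    simp only [List.length_cons]
    rw [List.range_succ_eq_map]
    simp only [PySem.List.enumerate, List.filter_cons, List.getD_cons_zero, List.filter_map]
    have hp : ((fun k => lc2564Bin ((q :: t).getD k []) == x) ∘ Nat.succ)
        = (fun k => lc2564Bin (t.getD k []) == x) := by
      funext k; simp [Function.comp]
    have htail : List.map (fun (p : Int × List Int) => p.1)
          (List.filter (fun p => lc2564Bin p.2 == x) (PySem.List.enumerate t (st + 1)))
        = List.map (fun (k : Nat) => st + (k : Int))
            (List.map Nat.succ
              (List.filter ((fun k => lc2564Bin ((q :: t).getD k []) == x) ∘ Nat.succ)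
                (List.range t.length))) := by
      rw [List.map_map, hp, ih (st + 1)]
      apply List.map_congr_left; intro k _
      simp only [Function.comp]; push_cast; ring
    by_cases hq : (lc2564Bin q == x) = true
    · rw [if_pos hq, if_pos hq, List.map_cons, List.map_cons, htail]
      congr 1
      simp
    · rw [if_neg hq, if_neg hq, htail]

theorem lc2564_groups_getD (queries : List (List Int)) (x : List Char) :
    ((PySem.List.enumerate queries 0).foldl
        (fun d p => d.modify (lc2564Bin p.2) [] (fun l => l ++ [p.1]))
        PySem.Dict.empty).getD x [] = lc2564Grp queries x := by
  have h1 : (PySem.List.enumerate queries 0).foldl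
        (fun d p => d.modify (lc2564Bin p.2) [] (fun l => l ++ [p.1])) PySem.Dict.empty
      = (((PySem.List.enumerate queries 0).map (fun p => (lc2564Bin p.2, p.1))).foldl
          (fun d p => d.modify p.1 [] (fun l => l ++ [p.2])) PySem.Dict.empty) := by
    rw [List.foldl_map]
  rw [h1, PySem.Dict.getD_foldl_modify_append]
  rw [List.filter_map, List.map_map]
  have h2 : ((fun p => p.1 == x) ∘ (fun (p : Int × List Int) => (lc2564Bin p.2, p.1)))
      = (fun p => lc2564Bin p.2 == x) := rfl
  have h3 : ((fun (x : List Char × Int) => x.2) ∘ (fun (p : Int × List Int) => (lc2564Bin p.2, p.1)))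
      = (fun (p : Int × List Int) => p.1) := rfl
  rw [h2, h3, lc2564_enum_filter x queries 0]
  unfold lc2564Grp lc2564X
  simp

theorem lc2564_groups_keys (queries : List (List Int)) :
    ((PySem.List.enumerate queries 0).foldl
        (fun d p => d.modify (lc2564Bin p.2) [] (fun l => l ++ [p.1]))
        PySem.Dict.empty).keys = PySem.Set.ofList (queries.map lc2564Bin) := by
  rw [PySem.Dict.keys_foldl_modify_key (PySem.List.enumerate queries 0)
      (fun p => lc2564Bin p.2) [] (fun _ p => fun l => l ++ [p.1]) PySem.Dict.empty]
  rw [PySem.Dict.keys_empty, lc2564_enum_map]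
  rfl

theorem lc2564_groups_keys_nodup (queries : List (List Int)) :
    ((PySem.List.enumerate queries 0).foldl
        (fun d p => d.modify (lc2564Bin p.2) [] (fun l => l ++ [p.1]))
        PySem.Dict.empty).keys.Nodup := by
  apply PySem.Dict.nodup_keys_foldl_modify_key (PySem.List.enumerate queries 0)
      (fun p => lc2564Bin p.2) [] (fun _ p => fun l => l ++ [p.1]) PySem.Dict.empty
  simp [PySem.Dict.keys_empty]

theorem lc2564_grp_nonneg (queries : List (List Int)) (x : List Char) :
    ∀ i ∈ lc2564Grp queries x, 0 ≤ i := by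
  intro i hi
  rcases (lc2564_mem_grp queries x i).1 hi with ⟨k, rfl, _, _⟩
  exact Int.natCast_nonneg k

theorem lc2564_altFold (cs : List Char) (queries : List (List Int)) :
    ∀ (K : List (List Char)) (ans : List (List Int)) (j : Nat),
      (K.foldl (fun ans x =>
          if PySem.Chars.find cs x ≠ -1 then
            (lc2564Grp queries x).foldl (fun a k => PySem.List.pySetD a k
              [PySem.Chars.find cs x, PySem.Chars.find cs x + (x.length : Int) - 1]) ans
          else ans) ans)[j]? =
        if j < queries.length ∧ lc2564X queries j ∈ K ∧
            PySem.Chars.find cs (lc2564X queries j) ≠ -1 then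
          ans[j]?.map (fun _ => [PySem.Chars.find cs (lc2564X queries j),
            PySem.Chars.find cs (lc2564X queries j) + ((lc2564X queries j).length : Int) - 1])
        else ans[j]? := by
  intro K
  induction K with
  | nil => intro ans j; simp
  | cons x K ih =>
    intro ans j
    rw [List.foldl_cons, ih]
    by_cases hfx : PySem.Chars.find cs x ≠ -1
    · rw [if_pos hfx, lc2564_setFold _ (lc2564_grp_nonneg queries x) _ ans j]
      by_cases hjx : (j : Int) ∈ lc2564Grp queries x
      · have hjm : j < queries.length ∧ lc2564X queries j = x := by
          obtain ⟨k, hk, hkm, hkx⟩ := (lc2564_mem_grp queries x _).1 hjx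
          have hkj : k = j := by omega
          exact ⟨hkj ▸ hkm, hkj ▸ hkx⟩
        obtain ⟨hjm1, hjx2⟩ := hjm
        rw [if_pos hjx]
        rw [← hjx2] at hfx ⊢
        by_cases hK : lc2564X queries j ∈ K
        · rw [if_pos ⟨hjm1, hK, hfx⟩, if_pos ⟨hjm1, List.mem_cons_of_mem _ hK, hfx⟩]
          cases ans[j]? <;> rfl
        · rw [if_neg (by rintro ⟨_, hmem, _⟩; exact hK hmem),
              if_pos ⟨hjm1, List.mem_cons_self, hfx⟩]
      · rw [if_neg hjx]
        by_cases hK : j < queries.length ∧ lc2564X queries j ∈ K ∧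
            PySem.Chars.find cs (lc2564X queries j) ≠ -1
        · rw [if_pos hK, if_pos ⟨hK.1, List.mem_cons_of_mem _ hK.2.1, hK.2.2⟩]
        · rw [if_neg hK, if_neg (by
            rintro ⟨hjm2, hmem, hfind⟩
            rcases List.mem_cons.1 hmem with heq | hmem
            · exact hjx ((lc2564_mem_grp queries x _).2 ⟨j, rfl, hjm2, heq⟩)
            · exact hK ⟨hjm2, hmem, hfind⟩)]
    · rw [if_neg hfx]
      rw [not_not] at hfx
      by_cases hK : j < queries.length ∧ lc2564X queries j ∈ K ∧
          PySem.Chars.find cs (lc2564X queries j) ≠ -1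
      · rw [if_pos hK, if_pos ⟨hK.1, List.mem_cons_of_mem _ hK.2.1, hK.2.2⟩]
      · rw [if_neg hK, if_neg (by
          rintro ⟨hjm2, hmem, hfind⟩
          rcases List.mem_cons.1 hmem with heq | hmem
          · rw [heq] at hfind; exact hfind hfx
          · exact hK ⟨hjm2, hmem, hfind⟩)]

theorem lc2564_alt_eq_tgt (s : String) (queries : List (List Int)) :
    lc_2564_alt s queries = lc2564Tgt s queries := by
  unfold lc_2564_alt
  simp only []
  rw [PySem.Dict.items_eq_map_keys _ (lc2564_groups_keys_nodup queries) ([] : List Int),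
      List.foldl_map]
  have hbody : (fun (ans : List (List Int)) (k : List Char) =>
        (fun (ans : List (List Int)) (xi : List Char × List Int) =>
          if PySem.Chars.find s.toList xi.1 ≠ -1 then
            xi.2.foldl (fun a k => PySem.List.pySetD a k
              [PySem.Chars.find s.toList xi.1,
               PySem.Chars.find s.toList xi.1 + PySem.List.len xi.1 - 1]) ans
          else ans) ans
          (k, ((PySem.List.enumerate queries 0).foldl
            (fun d p => d.modify (lc2564Bin p.2) [] (fun l => l ++ [p.1]))
            PySem.Dict.empty).getD k []))
      = (fun (ans : List (List Int)) (x : List Char) =>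
          if PySem.Chars.find s.toList x ≠ -1 then
            (lc2564Grp queries x).foldl (fun a k => PySem.List.pySetD a k
              [PySem.Chars.find s.toList x,
               PySem.Chars.find s.toList x + (x.length : Int) - 1]) ans
          else ans) := by
    funext ans x
    dsimp only
    rw [lc2564_groups_getD, PySem.List.len_eq]
  rw [hbody]
  apply List.ext_getElem?
  intro j
  rw [lc2564_altFold]
  have hans0 : ((PySem.List.pyRange 0 (PySem.List.len queries) 1).map
        (fun _ => ([-1, -1] : List Int)))[j]? =
      if j < queries.length then some [-1, -1] else none := by
    rw [PySem.List.len_eq, PySem.List.pyRange_zero_natCast, List.map_map, List.getElem?_map]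
    by_cases h : j < queries.length
    · rw [if_pos h, List.getElem?_eq_getElem (by simpa using h)]
      rfl
    · rw [if_neg h, List.getElem?_eq_none_iff.2 (by simpa using h)]
      rfl
  have htgt : (lc2564Tgt s queries)[j]? =
      queries[j]?.map (fun q => lc2564G s.toList (lc2564Bin q)) := by
    unfold lc2564Tgt
    rw [List.getElem?_map]
  rw [htgt]
  by_cases hj : j < queries.length
  · have hq : queries[j]? = some queries[j] := List.getElem?_eq_getElem hj
    have hXj : lc2564X queries j = lc2564Bin queries[j] := by
      unfold lc2564X
      rw [List.getD_eq_getElem _ _ hj]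
    have hmem : lc2564X queries j ∈ ((PySem.List.enumerate queries 0).foldl
        (fun d p => d.modify (lc2564Bin p.2) [] (fun l => l ++ [p.1]))
        PySem.Dict.empty).keys := by
      rw [lc2564_groups_keys, PySem.Set.mem_ofList, hXj]
      exact List.mem_map.2 ⟨queries[j], List.getElem_mem hj, rfl⟩
    rw [hq, hans0, if_pos hj]
    simp only [Option.map_some]
    rw [← hXj]
    by_cases hfind : PySem.Chars.find s.toList (lc2564X queries j) = -1
    · rw [if_neg (by rintro ⟨_, _, hne⟩; exact hne hfind)]
      unfold lc2564G
      rw [if_pos hfind]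
    · rw [if_pos ⟨hj, hmem, hfind⟩]
      unfold lc2564G
      rw [if_neg hfind]
  · rw [if_neg (by rintro ⟨h, _, _⟩; exact hj h), hans0, if_neg hj,
        List.getElem?_eq_none_iff.2 (by omega)]
    rfl

-- ---- A side: the first loop builds the same groups ----

theorem lc2564_set_add_eq_append (st : PySem.Set Int) (i : Int) (h : i ∉ st) :
    PySem.Set.add st i = st ++ [i] := by
  simp [PySem.Set.add, PySem.Set.contains, h]

theorem lc2564_addfold (key : Int → List Char) :
    ∀ (l : List Int), l.Nodup →
      ∀ (d : PySem.Dict (List Char) (PySem.Set Int)),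
        (∀ x i, i ∈ d.getD x [] → i ∉ l) →
        l.foldl (fun d i => d.modify (key i) ([] : PySem.Set Int) (fun st => PySem.Set.add st i)) d
          = l.foldl (fun d i => d.modify (key i) [] (fun st => st ++ [i])) d := by
  intro l
  induction l with
  | nil => intro _ d _; rfl
  | cons i l ih =>
    intro hnd d hd
    rw [List.foldl_cons, List.foldl_cons]
    have hni : i ∉ d.getD (key i) [] := fun hmem => hd (key i) i hmem (List.mem_cons_self)
    have hstep : d.modify (key i) ([] : PySem.Set Int) (fun st => PySem.Set.add st i)
        = d.modify (key i) [] (fun st => st ++ [i]) := by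
      simp only [PySem.Dict.modify]
      rw [lc2564_set_add_eq_append _ _ hni]
    rw [hstep]
    apply ih (List.nodup_cons.1 hnd).2
    intro x i' hmem
    rw [PySem.Dict.getD_modify] at hmem
    by_cases hx : x = key i
    · rw [if_pos hx] at hmem
      rcases List.mem_append.1 hmem with hmem | hmem
      · exact fun hl => hd x i' (hx ▸ hmem) (List.mem_cons_of_mem _ hl)
      · simp only [List.mem_singleton] at hmem
        subst hmem
        exact (List.nodup_cons.1 hnd).1
    · rw [if_neg hx] at hmem
      exact fun hl => hd x i' hmem (List.mem_cons_of_mem _ hl)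

theorem lc2564_range_map {γ : Type} (f : List Int → γ) (xs : List (List Int)) :
    (List.range xs.length).map (fun k => f (xs.getD k [])) = xs.map f := by
  apply List.ext_getElem (by simp)
  intro i h1 h2
  simp only [List.getElem_map, List.getElem_range]
  congr 1
  exact List.getD_eq_getElem xs [] (by simpa using h2)

theorem lc2564_dct0_getD (queries : List (List Int)) (x : List Char) :
    ((PySem.List.pyRange 0 (PySem.List.len queries) 1).foldl
        (fun d i => d.modify (lc2564Bin (PySem.List.pyGetD queries i [])) PySem.Set.empty
          (fun st => PySem.Set.add st i)) PySem.Dict.empty).getD x PySem.Set.empty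
      = lc2564Grp queries x := by
  have hR : PySem.List.pyRange 0 (PySem.List.len queries) 1
      = (List.range queries.length).map (fun (k : Nat) => (k : Int)) := by
    rw [PySem.List.len_eq, PySem.List.pyRange_zero_natCast]
  have hnd : (PySem.List.pyRange 0 (PySem.List.len queries) 1).Nodup := by
    rw [hR]
    exact (List.nodup_range).map (fun a b => by omega)
  simp only [PySem.Set.empty]
  rw [lc2564_addfold _ _ hnd PySem.Dict.empty (by simp [PySem.Dict.getD_empty])]
  have h1 : (PySem.List.pyRange 0 (PySem.List.len queries) 1).foldl
        (fun d i => d.modify (lc2564Bin (PySem.List.pyGetD queries i [])) [] (fun st => st ++ [i]))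
        PySem.Dict.empty
      = (((PySem.List.pyRange 0 (PySem.List.len queries) 1).map
          (fun i => (lc2564Bin (PySem.List.pyGetD queries i []), i))).foldl
          (fun d p => d.modify p.1 [] (fun l => l ++ [p.2])) PySem.Dict.empty) := by
    rw [List.foldl_map]
  rw [h1, PySem.Dict.getD_foldl_modify_append, List.filter_map, List.map_map, hR,
      List.filter_map, List.map_map]
  rw [PySem.Dict.getD_empty, List.nil_append]
  unfold lc2564Grp
  have hPQ : List.filter
        (((fun (p : List Char × Int) => p.1 == x) ∘
            (fun i => (lc2564Bin (PySem.List.pyGetD queries i []), i))) ∘ (fun (k : Nat) => (k : Int)))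
        (List.range queries.length)
      = List.filter (fun k => lc2564X queries k == x) (List.range queries.length) := by
    apply List.filter_congr
    intro k _
    simp [Function.comp, lc2564X]
  rw [hPQ]
  apply List.map_congr_left
  intro k _
  rfl

theorem lc2564_dct0_keys (queries : List (List Int)) :
    ((PySem.List.pyRange 0 (PySem.List.len queries) 1).foldl
        (fun d i => d.modify (lc2564Bin (PySem.List.pyGetD queries i [])) PySem.Set.empty
          (fun st => PySem.Set.add st i)) PySem.Dict.empty).keys
      = PySem.Set.ofList (queries.map lc2564Bin) := by
  rw [PySem.Dict.keys_foldl_modify_key (PySem.List.pyRange 0 (PySem.List.len queries) 1)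
      (fun i => lc2564Bin (PySem.List.pyGetD queries i [])) PySem.Set.empty
      (fun _ i => fun st => PySem.Set.add st i) PySem.Dict.empty]
  rw [PySem.Dict.keys_empty, PySem.List.len_eq, PySem.List.pyRange_zero_natCast, List.map_map]
  have : ((fun i => lc2564Bin (PySem.List.pyGetD queries i [])) ∘ (fun (k : Nat) => (k : Int)))
      = fun k => lc2564Bin (queries.getD k []) := by
    funext k; simp [Function.comp]
  rw [this, lc2564_range_map lc2564Bin queries]
  rfl

theorem lc2564_ceil_le (K : List (List Char)) (x : List Char) (hx : x ∈ K) :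
    (x.length : Int) ≤ (PySem.List.max? (K.map (fun x => PySem.List.len x)) id).getD 0 := by
  cases hmax : PySem.List.max? (K.map (fun x => PySem.List.len x)) id with
  | none =>
    rw [PySem.List.max?_eq_none_iff, List.map_eq_nil_iff] at hmax
    subst hmax
    cases hx
  | some c =>
    have := PySem.List.max?_isMax hmax (PySem.List.len x)
      (List.mem_map.2 ⟨x, hx, rfl⟩)
    simpa [PySem.List.len_eq] using this

-- ---- A side: the scan over windows ----

theorem lc2564_scanFold (cs : List Char) (queries : List (List Int)) :
    ∀ (ws : List (Int × Int)) (M : List Char → Bool)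
      (d : PySem.Dict (List Char) (PySem.Set Int)) (ans : List (List Int)),
      (∀ x, d.getD x PySem.Set.empty = if M x then [] else lc2564Grp queries x) →
      (ws.foldl (lc2564Step cs) (d, ans)).2.length = ans.length ∧
      ∀ j : Nat, j < queries.length →
        (ws.foldl (lc2564Step cs) (d, ans)).2[j]? =
          if M (lc2564X queries j) then ans[j]?
          else match ws.find? (fun w => lc2564Sub cs w == lc2564X queries j) with
            | some w => ans[j]?.map (fun _ => [w.1, w.2])
            | none => ans[j]? := by
  intro ws
  induction ws with
  | nil =>
    intro M d ans _
    refine ⟨rfl, fun j _ => ?_⟩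
    cases hM : M (lc2564X queries j) <;> simp
  | cons w ws ih =>
    intro M d ans hd
    have hg := hd (lc2564Sub cs w)
    have hstep : lc2564Step cs (d, ans) w =
        if M (lc2564Sub cs w) ∨ lc2564Grp queries (lc2564Sub cs w) = [] then (d, ans)
        else (d.insert (lc2564Sub cs w) PySem.Set.empty,
          (lc2564Grp queries (lc2564Sub cs w)).foldl
            (fun a k => PySem.List.pySetD a k [w.1, w.2]) ans) := by
      unfold lc2564Step
      simp only [hg]
      by_cases hM : M (lc2564Sub cs w)
      · simp [hM]
      · by_cases hgrp : lc2564Grp queries (lc2564Sub cs w) = []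
        · simp [hM, hgrp]
        · simp [hM, hgrp]
    have hd' : ∀ x, (lc2564Step cs (d, ans) w).1.getD x PySem.Set.empty =
        if (M x || (x == lc2564Sub cs w)) then [] else lc2564Grp queries x := by
      intro x
      rw [hstep]
      by_cases h1 : M (lc2564Sub cs w) = true ∨ lc2564Grp queries (lc2564Sub cs w) = []
      · rw [if_pos h1]
        show d.getD x PySem.Set.empty = _
        rw [hd x]
        by_cases hx : x = lc2564Sub cs w
        · subst hx
          rcases h1 with h1 | h1
          · simp [h1]
          · simp [h1]
        · simp [hx]
      · rw [if_neg h1]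
        show (d.insert (lc2564Sub cs w) PySem.Set.empty).getD x PySem.Set.empty = _
        rw [PySem.Dict.getD_insert]
        by_cases hx : x = lc2564Sub cs w
        · simp [hx, PySem.Set.empty]
        · rw [if_neg hx, hd x]
          simp [hx]
    have hans1 : ∀ j : Nat, j < queries.length → lc2564X queries j ≠ lc2564Sub cs w →
        (lc2564Step cs (d, ans) w).2[j]? = ans[j]? := by
      intro j hj hne
      rw [hstep]
      split_ifs with h1
      · rfl
      · show ((lc2564Grp queries (lc2564Sub cs w)).foldl _ ans)[j]? = _
        rw [lc2564_setFold _ (lc2564_grp_nonneg queries _) _ ans j,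
            if_neg (fun hmem => hne (by
              obtain ⟨k, hk, _, hkx⟩ := (lc2564_mem_grp queries _ _).1 hmem
              have hkj : k = j := by omega
              exact hkj ▸ hkx))]
    obtain ⟨ihlen, ihval⟩ := ih (fun x => M x || (x == lc2564Sub cs w))
      (lc2564Step cs (d, ans) w).1 (lc2564Step cs (d, ans) w).2 hd'
    have hfold : (w :: ws).foldl (lc2564Step cs) (d, ans)
        = ws.foldl (lc2564Step cs) ((lc2564Step cs (d, ans) w).1, (lc2564Step cs (d, ans) w).2) := by
      rw [List.foldl_cons]
    constructor
    · rw [hfold, ihlen, hstep]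
      split_ifs with h1
      · rfl
      · exact lc2564_setFold_length _ _ ans
    · intro j hj
      rw [hfold, ihval j hj]
      by_cases hne : lc2564X queries j = lc2564Sub cs w
      · have hfc : (w :: ws).find? (fun w' => lc2564Sub cs w' == lc2564X queries j) = some w :=
          List.find?_cons_of_pos (by simp [hne])
        rw [if_pos (by simp [hne]), hfc]
        by_cases hM : M (lc2564X queries j)
        · rw [if_pos hM, hstep, if_pos (Or.inl (hne ▸ hM))]
        · rw [if_neg hM]
          have hjmem : (j : Int) ∈ lc2564Grp queries (lc2564Sub cs w) :=
            hne ▸ lc2564_self_mem_grp queries j hj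
          have hgrpne : lc2564Grp queries (lc2564Sub cs w) ≠ [] := by
            intro hnil; rw [hnil] at hjmem; cases hjmem
          rw [hstep, if_neg (by
            rintro (h1 | h1)
            · exact hM (by rw [hne]; exact h1)
            · exact hgrpne h1)]
          show ((lc2564Grp queries (lc2564Sub cs w)).foldl _ ans)[j]? = _
          rw [lc2564_setFold _ (lc2564_grp_nonneg queries _) _ ans j, if_pos hjmem]
      · have hfc : (w :: ws).find? (fun w' => lc2564Sub cs w' == lc2564X queries j)
            = ws.find? (fun w' => lc2564Sub cs w' == lc2564X queries j) :=
          List.find?_cons_of_neg (by simp; exact fun h => hne h.symm)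
        rw [hfc]
        have hM' : (M (lc2564X queries j) || (lc2564X queries j == lc2564Sub cs w))
            = M (lc2564X queries j) := by simp [hne]
        rw [hM']
        by_cases hM : M (lc2564X queries j)
        · rw [if_pos hM, if_pos hM, hans1 j hj hne]
        · rw [if_neg hM, if_neg hM]
          simp only [hans1 j hj hne]

-- ---- A side: the first matching window is the first occurrence ----

/-- Strict scan order on windows: by end, then by start. -/
def lc2564R (a b : Int × Int) : Prop := a.2 < b.2 ∨ (a.2 = b.2 ∧ a.1 < b.1)

theorem lc2564_mem_W (cs : List Char) (ceil : Int) (w : Int × Int) :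
    w ∈ lc2564W cs ceil ↔
      0 ≤ w.2 ∧ w.2 < (cs.length : Int) ∧ max (w.2 - ceil + 1) 0 ≤ w.1 ∧ w.1 < w.2 + 1 := by
  unfold lc2564W
  rw [List.mem_flatMap]
  constructor
  · rintro ⟨i, hi, hw⟩
    rw [PySem.List.mem_pyRange_one] at hi
    rw [List.mem_map] at hw
    obtain ⟨j, hj, rfl⟩ := hw
    rw [PySem.List.mem_pyRange_one] at hj
    exact ⟨hi.1, hi.2, hj.1, hj.2⟩
  · rintro ⟨h1, h2, h3, h4⟩
    refine ⟨w.2, PySem.List.mem_pyRange_one.2 ⟨h1, h2⟩, List.mem_map.2 ⟨w.1,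
      PySem.List.mem_pyRange_one.2 ⟨h3, h4⟩, rfl⟩⟩

theorem lc2564_pyRange_pairwise (a b : Int) : (PySem.List.pyRange a b 1).Pairwise (· < ·) := by
  by_cases h : b ≤ a
  · rw [PySem.List.pyRange_one_eq_nil h]
    exact List.Pairwise.nil
  · rw [PySem.List.pyRange_one_cons (by omega)]
    constructor
    · intro x hx
      rw [PySem.List.mem_pyRange_one] at hx
      omega
    · exact lc2564_pyRange_pairwise (a + 1) b
termination_by (b - a).toNat
decreasing_by omega

theorem lc2564_pairwise_flatMap {α β : Type} (R : β → β → Prop) (g : α → List β) (l : List α)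
    (h1 : ∀ a ∈ l, (g a).Pairwise R)
    (h2 : l.Pairwise (fun a b => ∀ x ∈ g a, ∀ y ∈ g b, R x y)) :
    (l.flatMap g).Pairwise R := by
  induction l with
  | nil => exact List.Pairwise.nil
  | cons a l ih =>
    rw [List.flatMap_cons, List.pairwise_append]
    obtain ⟨h2a, h2l⟩ := List.pairwise_cons.1 h2
    refine ⟨h1 a (List.mem_cons_self), ih (fun a' ha' => h1 a' (List.mem_cons_of_mem _ ha')) h2l, ?_⟩
    intro x hx y hy
    rw [List.mem_flatMap] at hy
    obtain ⟨b, hb, hyb⟩ := hy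
    exact h2a b hb x hx y hyb

theorem lc2564_W_pairwise (cs : List Char) (ceil : Int) :
    (lc2564W cs ceil).Pairwise lc2564R := by
  unfold lc2564W
  apply lc2564_pairwise_flatMap
  · intro i _
    apply List.Pairwise.map
    · intro j j' (hj : j < j')
      exact Or.inr ⟨rfl, hj⟩
    · exact lc2564_pyRange_pairwise _ _
  · apply List.Pairwise.imp_of_mem ?_ (lc2564_pyRange_pairwise 0 (cs.length : Int))
    intro i i' _ _ hii
    intro x hx y hy
    rw [List.mem_map] at hx hy
    obtain ⟨j, _, rfl⟩ := hx
    obtain ⟨j', _, rfl⟩ := hy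
    exact Or.inl hii

theorem lc2564_find?_min {α : Type} (R : α → α → Prop) (hR : ∀ a b, R a b → ¬ R b a)
    (l : List α) (p : α → Bool) (hpw : l.Pairwise R) (w : α) (hw : w ∈ l) (hp : p w = true)
    (hmin : ∀ w' ∈ l, p w' = true → w = w' ∨ R w w') : l.find? p = some w := by
  induction l with
  | nil => cases hw
  | cons a l ih =>
    obtain ⟨hpa1, hpw'⟩ := List.pairwise_cons.1 hpw
    by_cases hpa : p a = true
    · rw [List.find?_cons_of_pos hpa]
      rcases List.mem_cons.1 hw with rfl | hwl
      · rfl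
      · rcases hmin a (List.mem_cons_self) hpa with rfl | hRwa
        · rfl
        · exact absurd (hpa1 w hwl) (hR w a hRwa)
    · rw [List.find?_cons_of_neg hpa]
      have hwl : w ∈ l := by
        rcases List.mem_cons.1 hw with rfl | h
        · exact absurd hp hpa
        · exact h
      exact ih hpw' hwl (fun w' hw' hq => hmin w' (List.mem_cons_of_mem _ hw') hq)

theorem lc2564_sub_prefix (cs : List Char) (x : List Char) (w : Int × Int)
    (hb : 0 ≤ w.2 ∧ w.2 < (cs.length : Int) ∧ max (w.2 - ceil + 1) 0 ≤ w.1 ∧ w.1 < w.2 + 1)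
    (hsub : lc2564Sub cs w = x) :
    (w.2 : Int) = w.1 + (x.length : Int) - 1 ∧ x <+: cs.drop w.1.toNat := by
  obtain ⟨h1, h2, h3, h4⟩ := hb
  have hj0 : 0 ≤ w.1 := le_trans (le_max_right _ _) h3
  unfold lc2564Sub at hsub
  rw [PySem.List.slice_toNat cs hj0 (by omega)] at hsub
  have hlen : x.length = min ((w.2 + 1).toNat - w.1.toNat) (cs.length - w.1.toNat) := by
    rw [← hsub]
    simp [List.length_take, List.length_drop]
  have hlen' : x.length = (w.2 + 1).toNat - w.1.toNat := by omega
  constructor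
  · omega
  · rw [← hsub]
    exact List.take_prefix _ _

theorem lc2564_findW (cs : List Char) (ceil : Int) (x : List Char) (hx : x ≠ [])
    (hlen : (x.length : Int) ≤ ceil) :
    (lc2564W cs ceil).find? (fun w => lc2564Sub cs w == x) =
      if PySem.Chars.find cs x = -1 then none
      else some (PySem.Chars.find cs x,
        PySem.Chars.find cs x + (x.length : Int) - 1) := by
  have hxlen : 1 ≤ x.length := by
    cases x with
    | nil => exact absurd rfl hx
    | cons a l => simp
  by_cases hneg : PySem.Chars.find cs x = -1
  · rw [if_pos hneg]
    apply List.find?_eq_none.2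
    intro w hw hpw
    rw [beq_iff_eq] at hpw
    obtain ⟨_, hpre⟩ := lc2564_sub_prefix cs x w ((lc2564_mem_W cs ceil w).1 hw) hpw
    rw [PySem.Chars.find_eq_neg_one_iff] at hneg
    exact hneg (hpre.isInfix.trans (cs.drop_suffix w.1.toNat).isInfix)
  · rw [if_neg hneg]
    have hp0 : 0 ≤ PySem.Chars.find cs x := by
      have := PySem.Chars.neg_one_le_find cs x
      omega
    obtain ⟨hpre, hmin⟩ := PySem.Chars.find_spec hp0
    set p : Int := PySem.Chars.find cs x with hp
    have hple : p ≤ (cs.length : Int) := PySem.Chars.find_le_length cs x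
    have hLn : p.toNat + x.length ≤ cs.length := by
      have := hpre.length_le
      simp [List.length_drop] at this
      omega
    apply lc2564_find?_min lc2564R
    · intro a b hab hba
      unfold lc2564R at hab hba
      omega
    · exact lc2564_W_pairwise cs ceil
    · rw [lc2564_mem_W]
      refine ⟨by simp; omega, by simp; omega, ?_, by simp; omega⟩
      simp only [max_le_iff]
      constructor <;> [omega; exact hp0]
    · rw [beq_iff_eq]
      unfold lc2564Sub
      simp only
      rw [PySem.List.slice_toNat cs hp0 (by omega)]
      have h1 : (p + (x.length : Int) - 1 + 1).toNat - p.toNat = x.length := by omega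
      rw [h1]
      rw [List.prefix_iff_eq_take] at hpre
      exact hpre.symm
    · intro w' hw' hpw'
      rw [beq_iff_eq] at hpw'
      have hb := (lc2564_mem_W cs ceil w').1 hw'
      obtain ⟨hww, hpre'⟩ := lc2564_sub_prefix cs x w' hb hpw'
      have hj0 : 0 ≤ w'.1 := le_trans (le_max_right _ _) hb.2.2.1
      have hjp : p ≤ w'.1 := by
        by_contra hlt
        push_neg at hlt
        exact hmin w'.1.toNat (by omega) hpre'
      by_cases hje : w'.1 = p
      · left
        have : w'.2 = p + (x.length : Int) - 1 := by omega
        exact (Prod.ext hje.symm this.symm)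
      · right
        unfold lc2564R
        left
        simp only
        omega

theorem lc2564_a_eq_tgt (s : String) (queries : List (List Int)) :
    lc_2564 s queries = lc2564Tgt s queries := by
  unfold lc_2564
  simp only []
  rw [PySem.Str.len_eq]
  have hflat : ∀ (init : PySem.Dict (List Char) (PySem.Set Int) × List (List Int)) (ceil : Int),
      (PySem.List.pyRange 0 ((s.toList.length : Nat) : Int) 1).foldl
        (fun (st : PySem.Dict (List Char) (PySem.Set Int) × List (List Int)) i =>
          (PySem.List.pyRange (max (i - ceil + 1) 0) (i + 1) 1).foldl
            (fun st2 j =>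
              let sub := PySem.List.slice s.toList (some j) (some (i + 1))
              let grp := st2.1.getD sub PySem.Set.empty
              if grp ≠ [] then
                (st2.1.insert sub PySem.Set.empty,
                 grp.foldl (fun a k => PySem.List.pySetD a k [j, i]) st2.2)
              else st2) st) init
      = (lc2564W s.toList ceil).foldl (lc2564Step s.toList) init := by
    intro init ceil
    unfold lc2564W
    rw [List.foldl_flatMap]
    apply PySem.List.foldl_congr_mem
    intro acc i _
    rw [List.foldl_map]
    rfl
  rw [hflat]
  obtain ⟨hlen2, hval⟩ := lc2564_scanFold s.toList queries
    (lc2564W s.toList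
      ((PySem.List.max? ((((PySem.List.pyRange 0 (PySem.List.len queries) 1).foldl
        (fun d i => d.modify (lc2564Bin (PySem.List.pyGetD queries i [])) PySem.Set.empty
          (fun st => PySem.Set.add st i)) PySem.Dict.empty).keys).map
            (fun x => PySem.List.len x)) id).getD 0))
    (fun _ => false)
    ((PySem.List.pyRange 0 (PySem.List.len queries) 1).foldl
        (fun d i => d.modify (lc2564Bin (PySem.List.pyGetD queries i [])) PySem.Set.empty
          (fun st => PySem.Set.add st i)) PySem.Dict.empty)
    ((PySem.List.pyRange 0 (PySem.List.len queries) 1).map (fun _ => ([-1, -1] : List Int)))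
    (fun x => by rw [lc2564_dct0_getD]; rfl)
  have hanslen : ((PySem.List.pyRange 0 (PySem.List.len queries) 1).map
      (fun _ => ([-1, -1] : List Int))).length = queries.length := by
    rw [PySem.List.len_eq, PySem.List.pyRange_zero_natCast]
    simp
  apply List.ext_getElem?
  intro j
  have hans0 : ((PySem.List.pyRange 0 (PySem.List.len queries) 1).map
        (fun _ => ([-1, -1] : List Int)))[j]? =
      if j < queries.length then some [-1, -1] else none := by
    rw [PySem.List.len_eq, PySem.List.pyRange_zero_natCast, List.map_map, List.getElem?_map]
    by_cases h : j < queries.length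
    · rw [if_pos h, List.getElem?_eq_getElem (by simpa using h)]
      rfl
    · rw [if_neg h, List.getElem?_eq_none_iff.2 (by simpa using h)]
      rfl
  have htgt : (lc2564Tgt s queries)[j]? =
      queries[j]?.map (fun q => lc2564G s.toList (lc2564Bin q)) := by
    unfold lc2564Tgt
    rw [List.getElem?_map]
  rw [htgt]
  by_cases hj : j < queries.length
  · rw [hval j hj, if_neg (by simp)]
    have hq : queries[j]? = some queries[j] := List.getElem?_eq_getElem hj
    have hXj : lc2564X queries j = lc2564Bin queries[j] := by
      unfold lc2564X
      rw [List.getD_eq_getElem _ _ hj]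
    have hxne : lc2564X queries j ≠ [] := by
      unfold lc2564X
      exact lc2564Bin_ne_nil _
    have hmemK : lc2564X queries j ∈ ((PySem.List.pyRange 0 (PySem.List.len queries) 1).foldl
        (fun d i => d.modify (lc2564Bin (PySem.List.pyGetD queries i [])) PySem.Set.empty
          (fun st => PySem.Set.add st i)) PySem.Dict.empty).keys := by
      rw [lc2564_dct0_keys, PySem.Set.mem_ofList, hXj]
      exact List.mem_map.2 ⟨queries[j], List.getElem_mem hj, rfl⟩
    have hceil : ((lc2564X queries j).length : Int)
        ≤ (PySem.List.max? ((((PySem.List.pyRange 0 (PySem.List.len queries) 1).foldl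
            (fun d i => d.modify (lc2564Bin (PySem.List.pyGetD queries i [])) PySem.Set.empty
              (fun st => PySem.Set.add st i)) PySem.Dict.empty).keys).map
            (fun x => PySem.List.len x)) id).getD 0 :=
      lc2564_ceil_le _ _ hmemK
    rw [lc2564_findW s.toList _ (lc2564X queries j) hxne hceil]
    rw [hq, hans0, if_pos hj]
    simp only [Option.map_some]
    rw [← hXj]
    by_cases hfind : PySem.Chars.find s.toList (lc2564X queries j) = -1
    · rw [if_pos hfind]
      unfold lc2564G
      rw [if_pos hfind]
    · rw [if_neg hfind]
      unfold lc2564G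
      rw [if_neg hfind]
  · rw [List.getElem?_eq_none_iff.2 (by rw [hlen2, hanslen]; omega)]
    rw [show queries[j]? = none from List.getElem?_eq_none_iff.2 (by omega)]
    rfl

-- ===== VERDICT (by name: the statement is the Claim_ definition above) =====
theorem lc_2564_spec : Claim_equal_lc_2564 := by
  intro s queries _ _
  unfold Spec_lc_2564
  rw [lc2564_a_eq_tgt, lc2564_alt_eq_tgt]
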